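-- pv_equiv track=rewrite | github.com/dmmiller/adventofcode | 2023/day11/solution.py | expandGalaxies
-- ===== SOURCE A (Python) =====
-- def expandGalaxies(galaxies: list[tuple[int, int]], expansionValue, expansionRows, expansionColumns):
--   newGalaxies = []
--   for galaxy in galaxies:
--     xAdjustment = len(list(filter(lambda x: x < galaxy[0], expansionColumns)))
--     yAdjustment = len(list(filter(lambda y: y < galaxy[1], expansionRows)))
--     newGalaxies.append((galaxy[0] + xAdjustment * (expansionValue - 1),
--                         galaxy[1] + yAdjustment * (expansionValue - 1)))
--   return newGalaxies
-- ===== SOURCE B (Python) =====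
-- from bisect import bisect_left
--
--
-- def expandGalaxies(galaxies, expansionValue, expansionRows, expansionColumns):
--   cols = sorted(expansionColumns)
--   rows = sorted(expansionRows)
--   scale = expansionValue - 1
--   return [(x + bisect_left(cols, x) * scale, y + bisect_left(rows, y) * scale)
--           for (x, y) in galaxies]
-- ===== Notes on version B (the rewrite author's own statement) =====
-- stated objective: faster
-- what changed: Instead of linearly filtering both expansion lists for every galaxy, B sorts each expansion list once and counts preceding expansions with a binary search (bisect_left) per coordinate.
import Mathlib
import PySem

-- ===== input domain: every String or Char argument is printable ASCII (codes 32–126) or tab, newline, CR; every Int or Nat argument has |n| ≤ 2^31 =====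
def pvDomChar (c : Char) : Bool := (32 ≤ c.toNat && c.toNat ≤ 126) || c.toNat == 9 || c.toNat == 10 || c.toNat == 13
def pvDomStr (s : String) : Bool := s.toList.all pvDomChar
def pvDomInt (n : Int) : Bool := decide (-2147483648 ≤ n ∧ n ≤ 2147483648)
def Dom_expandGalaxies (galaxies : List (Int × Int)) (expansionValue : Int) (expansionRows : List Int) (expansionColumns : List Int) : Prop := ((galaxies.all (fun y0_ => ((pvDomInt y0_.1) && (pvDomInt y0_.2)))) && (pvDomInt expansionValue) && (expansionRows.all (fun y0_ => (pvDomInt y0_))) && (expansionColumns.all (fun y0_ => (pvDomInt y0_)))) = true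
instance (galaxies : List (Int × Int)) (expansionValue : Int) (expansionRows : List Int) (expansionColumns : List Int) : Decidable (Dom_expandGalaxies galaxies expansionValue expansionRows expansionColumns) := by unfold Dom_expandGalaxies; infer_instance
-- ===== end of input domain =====

-- ===== PORT A =====
-- A: for each galaxy, count smaller expansion columns/rows by filtering the full lists.
def expandGalaxies (galaxies : List (Int × Int)) (expansionValue : Int) (expansionRows : List Int) (expansionColumns : List Int) : List (Int × Int) :=
  galaxies.foldl (fun newGalaxies galaxy =>
    let xAdjustment : Int := ((expansionColumns.filter (fun x => x < galaxy.1)).length : Int)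
    let yAdjustment : Int := ((expansionRows.filter (fun y => y < galaxy.2)).length : Int)
    newGalaxies ++ [(galaxy.1 + xAdjustment * (expansionValue - 1),
                     galaxy.2 + yAdjustment * (expansionValue - 1))]) []

-- ===== PORT B =====
-- B (faster in a timing run): sort each expansion list once, then binary-search
-- (bisect_left) per coordinate instead of filtering the whole list per galaxy.
def expandGalaxies_alt (galaxies : List (Int × Int)) (expansionValue : Int) (expansionRows : List Int) (expansionColumns : List Int) : List (Int × Int) :=
  let cols := PySem.List.sorted expansionColumns (fun v => v) false
  let rows := PySem.List.sorted expansionRows (fun v => v) false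
  let scale := expansionValue - 1
  galaxies.map (fun g =>
    (g.1 + (PySem.List.bisectLeft cols g.1 : Int) * scale,
     g.2 + (PySem.List.bisectLeft rows g.2 : Int) * scale))

-- ===== PRECONDITION & SPEC =====
def Spec_expandGalaxies (galaxies : List (Int × Int)) (expansionValue : Int) (expansionRows : List Int) (expansionColumns : List Int) (out : List (Int × Int)) : Prop := out = expandGalaxies_alt galaxies expansionValue expansionRows expansionColumns
instance (galaxies : List (Int × Int)) (expansionValue : Int) (expansionRows : List Int) (expansionColumns : List Int) (out : List (Int × Int)) : Decidable (Spec_expandGalaxies galaxies expansionValue expansionRows expansionColumns out) := by unfold Spec_expandGalaxies; infer_instance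

-- ===== CLAIM (what is proved, stated in full; the proofs are below) =====
def Claim_equal_expandGalaxies : Prop := ∀ (galaxies : List (Int × Int)) (expansionValue : Int) (expansionRows : List Int) (expansionColumns : List Int), Dom_expandGalaxies galaxies expansionValue expansionRows expansionColumns → Spec_expandGalaxies galaxies expansionValue expansionRows expansionColumns (expandGalaxies galaxies expansionValue expansionRows expansionColumns)

-- ===== LEMMAS AND PROOFS =====

-- ===== VERDICT (by name: the statement is the Claim_ definition above) =====
-- count of elements < x equals bisect_left position in the sorted copy
lemma count_lt_eq_bisect (l : List Int) (x : Int) :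
    (l.filter (fun c => c < x)).length = PySem.List.bisectLeft (PySem.List.sorted l (fun v => v) false) x := by
  set s := PySem.List.sorted l (fun v => v) false with hs
  have hp : s.Pairwise (fun a b => a ≤ b) := PySem.List.sorted_pairwise l (fun v => v)
  obtain ⟨hb, hlt, hge⟩ := PySem.List.bisectLeft_spec s x hp
  set b := PySem.List.bisectLeft s x with hbdef
  have hperm : s.Perm l := PySem.List.sorted_perm l (fun v => v) false
  have h1 : (l.filter (fun c => c < x)).length = l.countP (fun c => decide (c < x)) := by
    simp [List.countP_eq_length_filter]
  have h2 : l.countP (fun c => decide (c < x)) = s.countP (fun c => decide (c < x)) :=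
    (hperm.countP_eq _).symm
  have hsplit : s.countP (fun c => decide (c < x)) =
      (s.take b).countP (fun c => decide (c < x)) + (s.drop b).countP (fun c => decide (c < x)) := by
    conv_lhs => rw [← List.take_append_drop b s]
    rw [List.countP_append]
  have htake : (s.take b).countP (fun c => decide (c < x)) = b := by
    have hall : ∀ a ∈ s.take b, (fun c => decide (c < x)) a = true := by
      intro a ha
      obtain ⟨i, hi, hgi⟩ := List.mem_iff_getElem.mp ha
      have hib : i < b := lt_of_lt_of_le hi (by simp [List.length_take])
      have hil : i < s.length := lt_of_lt_of_le hib hb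
      have : (s.take b)[i] = s[i] := List.getElem_take
      simp only [this] at hgi
      subst hgi
      simpa using hlt i hil hib
    rw [List.countP_eq_length.mpr hall, List.length_take, Nat.min_eq_left hb]
  have hdrop : (s.drop b).countP (fun c => decide (c < x)) = 0 := by
    rw [List.countP_eq_zero]
    intro a ha
    obtain ⟨i, hi, hgi⟩ := List.mem_iff_getElem.mp ha
    rw [List.getElem_drop] at hgi
    have hil : b + i < s.length := by
      have := hi; simp [List.length_drop] at this; omega
    have hxa : x ≤ a := hgi ▸ hge (b + i) hil (Nat.le_add_right _ _)
    simp; omega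
  omega

theorem expandGalaxies_spec : Claim_equal_expandGalaxies := by
  intro galaxies expansionValue expansionRows expansionColumns _
  unfold Spec_expandGalaxies expandGalaxies expandGalaxies_alt
  rw [PySem.List.foldl_append_singleton_eq_map]
  simp only [List.nil_append]
  apply List.map_congr_left
  intro g _
  rw [count_lt_eq_bisect expansionColumns g.1, count_lt_eq_bisect expansionRows g.2]
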